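-- pv_equiv track=rewrite | github.com/tusharjadhav3302/forge | src/forge/models/workflow.py | get_workflow_phase
-- ===== SOURCE A (Python) =====
-- from enum import Enum
--
-- class ForgeLabel(str, Enum):
--     """Labels used to track Forge workflow state.
--
--     These labels are added/removed to track progress through the
--     SDLC workflow without requiring custom Jira statuses.
--     """
--
--     # PRD workflow
--     PRD_DRAFTING = "forge:prd-drafting"
--     PRD_PENDING = "forge:prd-pending"
--     PRD_APPROVED = "forge:prd-approved"
--     PRD_REJECTED = "forge:prd-rejected"
--
--     # Spec workflow
--     SPEC_DRAFTING = "forge:spec-drafting"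
--     SPEC_PENDING = "forge:spec-pending"
--     SPEC_APPROVED = "forge:spec-approved"
--     SPEC_REJECTED = "forge:spec-rejected"
--
--     # Epic/Plan workflow
--     PLAN_DRAFTING = "forge:plan-drafting"
--     PLAN_PENDING = "forge:plan-pending"
--     PLAN_APPROVED = "forge:plan-approved"
--     PLAN_REJECTED = "forge:plan-rejected"
--
--     # Task workflow
--     TASK_GENERATED = "forge:task-generated"
--     TASK_IMPLEMENTING = "forge:implementing"
--     TASK_PR_CREATED = "forge:pr-created"
--     TASK_CI_PENDING = "forge:ci-pending"
--     TASK_CI_FAILED = "forge:ci-failed"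
--     TASK_REVIEW_PENDING = "forge:review-pending"
--     TASK_REVIEW_APPROVED = "forge:review-approved"
--
--     # Bug workflow
--     RCA_DRAFTING = "forge:rca-drafting"
--     RCA_PENDING = "forge:rca-pending"
--     RCA_APPROVED = "forge:rca-approved"
--
--     # General
--     FORGE_MANAGED = "forge:managed"
--     BLOCKED = "forge:blocked"
--     RETRY = "forge:retry"  # Add to trigger retry of current stage
--
-- def get_workflow_phase(labels: list[str]) -> str | None:
--     """Determine workflow phase from Forge labels.
--
--     Args:
--         labels: List of Jira labels on the issue.
--
--     Returns:
--         Current workflow phase or None if not Forge-managed.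
--     """
--     forge_labels = [label for label in labels if label.startswith("forge:")]
--
--     if not forge_labels:
--         return None
--
--     if ForgeLabel.FORGE_MANAGED.value not in labels:
--         return None
--
--     # Priority order for phase detection (most specific first)
--     phase_priority = [
--         (ForgeLabel.PRD_DRAFTING.value, "prd_generation"),
--         (ForgeLabel.PRD_PENDING.value, "prd_approval"),
--         (ForgeLabel.PRD_APPROVED.value, "spec_generation"),
--         (ForgeLabel.SPEC_DRAFTING.value, "spec_generation"),
--         (ForgeLabel.SPEC_PENDING.value, "spec_approval"),
--         (ForgeLabel.SPEC_APPROVED.value, "epic_decomposition"),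
--         (ForgeLabel.PLAN_DRAFTING.value, "epic_decomposition"),
--         (ForgeLabel.PLAN_PENDING.value, "plan_approval"),
--         (ForgeLabel.PLAN_APPROVED.value, "task_generation"),
--         (ForgeLabel.TASK_GENERATED.value, "task_routing"),
--         (ForgeLabel.TASK_IMPLEMENTING.value, "implementation"),
--         (ForgeLabel.TASK_PR_CREATED.value, "pr_created"),
--         (ForgeLabel.TASK_CI_PENDING.value, "ci_evaluation"),
--         (ForgeLabel.TASK_CI_FAILED.value, "ci_fix"),
--         (ForgeLabel.TASK_REVIEW_PENDING.value, "human_review"),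
--         (ForgeLabel.TASK_REVIEW_APPROVED.value, "complete"),
--         (ForgeLabel.RCA_DRAFTING.value, "rca_generation"),
--         (ForgeLabel.RCA_PENDING.value, "rca_approval"),
--         (ForgeLabel.RCA_APPROVED.value, "bug_fix"),
--         (ForgeLabel.BLOCKED.value, "blocked"),
--     ]
--
--     for label, phase in phase_priority:
--         if label in forge_labels:
--             return phase
--
--     return "unknown"
-- ===== SOURCE B (Python) =====
-- PHASE_BY_LABEL = {
--     "forge:prd-drafting": (0, "prd_generation"),
--     "forge:prd-pending": (1, "prd_approval"),
--     "forge:prd-approved": (2, "spec_generation"),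
--     "forge:spec-drafting": (3, "spec_generation"),
--     "forge:spec-pending": (4, "spec_approval"),
--     "forge:spec-approved": (5, "epic_decomposition"),
--     "forge:plan-drafting": (6, "epic_decomposition"),
--     "forge:plan-pending": (7, "plan_approval"),
--     "forge:plan-approved": (8, "task_generation"),
--     "forge:task-generated": (9, "task_routing"),
--     "forge:implementing": (10, "implementation"),
--     "forge:pr-created": (11, "pr_created"),
--     "forge:ci-pending": (12, "ci_evaluation"),
--     "forge:ci-failed": (13, "ci_fix"),
--     "forge:review-pending": (14, "human_review"),
--     "forge:review-approved": (15, "complete"),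
--     "forge:rca-drafting": (16, "rca_generation"),
--     "forge:rca-pending": (17, "rca_approval"),
--     "forge:rca-approved": (18, "bug_fix"),
--     "forge:blocked": (19, "blocked"),
-- }
--
--
-- def get_workflow_phase(labels: list[str]) -> str | None:
--     """Determine workflow phase from Forge labels (min-rank scan of the labels)."""
--     if not any(label.startswith("forge:") for label in labels):
--         return None
--     if "forge:managed" not in labels:
--         return None
--     best = None
--     for label in labels:
--         entry = PHASE_BY_LABEL.get(label)
--         if entry is not None and (best is None or entry[0] < best[0]):
--             best = entry
--     return best[1] if best is not None else "unknown"
-- ===== Notes on version B (the rewrite author's own statement) =====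
-- stated objective: alternative
-- what changed: Instead of scanning the fixed 20-entry priority list in order and testing each label for membership in the input, B builds a label->(rank, phase) dict once and makes a single pass over the input labels, keeping the entry with the smallest rank; the guards are kept and the no-match fallback is 'unknown'.
import Mathlib
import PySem

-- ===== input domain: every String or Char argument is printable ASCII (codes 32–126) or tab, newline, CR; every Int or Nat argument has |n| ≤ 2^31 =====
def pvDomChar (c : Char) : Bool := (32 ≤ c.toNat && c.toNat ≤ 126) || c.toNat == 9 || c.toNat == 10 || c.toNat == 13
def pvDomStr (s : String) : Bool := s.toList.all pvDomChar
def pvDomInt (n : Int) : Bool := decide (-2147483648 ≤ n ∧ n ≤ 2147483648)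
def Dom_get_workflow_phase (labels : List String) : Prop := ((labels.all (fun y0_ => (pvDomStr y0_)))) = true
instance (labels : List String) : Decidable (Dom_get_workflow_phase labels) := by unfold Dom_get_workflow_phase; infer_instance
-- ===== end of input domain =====

-- B replaces A's in-order scan of the fixed priority list by one pass over the input
-- labels with a label->(rank, phase) dict, keeping the minimum-rank entry (alternative).

-- ===== PORT A =====
-- the literal phase_priority list of A
def pvPriority : List (String × String) :=
  [("forge:prd-drafting", "prd_generation"),
   ("forge:prd-pending", "prd_approval"),
   ("forge:prd-approved", "spec_generation"),
   ("forge:spec-drafting", "spec_generation"),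
   ("forge:spec-pending", "spec_approval"),
   ("forge:spec-approved", "epic_decomposition"),
   ("forge:plan-drafting", "epic_decomposition"),
   ("forge:plan-pending", "plan_approval"),
   ("forge:plan-approved", "task_generation"),
   ("forge:task-generated", "task_routing"),
   ("forge:implementing", "implementation"),
   ("forge:pr-created", "pr_created"),
   ("forge:ci-pending", "ci_evaluation"),
   ("forge:ci-failed", "ci_fix"),
   ("forge:review-pending", "human_review"),
   ("forge:review-approved", "complete"),
   ("forge:rca-drafting", "rca_generation"),
   ("forge:rca-pending", "rca_approval"),
   ("forge:rca-approved", "bug_fix"),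
   ("forge:blocked", "blocked")]

-- A's 'for label, phase in phase_priority: if label in forge_labels: return phase' loop
def pvScanA : List (String × String) → List String → String
  | [], _ => "unknown"
  | (l, p) :: rest, forge => if forge.contains l then p else pvScanA rest forge

def get_workflow_phase (labels : List String) : Option String :=
  let forge := labels.filter (fun lb => PySem.Str.startswith lb "forge:")
  if forge = [] then none
  else if !(labels.contains "forge:managed") then none
  else some (pvScanA pvPriority forge)

-- ===== PORT B =====
-- B's module-level PHASE_BY_LABEL dict
def pvPhaseByLabel : PySem.Dict String (Int × String) :=
  PySem.Dict.ofList
    [("forge:prd-drafting", (0, "prd_generation")),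
     ("forge:prd-pending", (1, "prd_approval")),
     ("forge:prd-approved", (2, "spec_generation")),
     ("forge:spec-drafting", (3, "spec_generation")),
     ("forge:spec-pending", (4, "spec_approval")),
     ("forge:spec-approved", (5, "epic_decomposition")),
     ("forge:plan-drafting", (6, "epic_decomposition")),
     ("forge:plan-pending", (7, "plan_approval")),
     ("forge:plan-approved", (8, "task_generation")),
     ("forge:task-generated", (9, "task_routing")),
     ("forge:implementing", (10, "implementation")),
     ("forge:pr-created", (11, "pr_created")),
     ("forge:ci-pending", (12, "ci_evaluation")),
     ("forge:ci-failed", (13, "ci_fix")),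
     ("forge:review-pending", (14, "human_review")),
     ("forge:review-approved", (15, "complete")),
     ("forge:rca-drafting", (16, "rca_generation")),
     ("forge:rca-pending", (17, "rca_approval")),
     ("forge:rca-approved", (18, "bug_fix")),
     ("forge:blocked", (19, "blocked"))]

-- one iteration of B's loop body
def pvStep (best : Option (Int × String)) (lb : String) : Option (Int × String) :=
  match pvPhaseByLabel.get? lb with
  | none => best
  | some e =>
    match best with
    | none => some e
    | some b => if e.1 < b.1 then some e else best

def get_workflow_phase_alt (labels : List String) : Option String :=
  if !(labels.any (fun lb => PySem.Str.startswith lb "forge:")) then none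
  else if !(labels.contains "forge:managed") then none
  else
    match labels.foldl pvStep none with
    | none => some "unknown"
    | some b => some b.2

-- ===== PRECONDITION & SPEC =====
def Spec_get_workflow_phase (labels : List String) (out : Option String) : Prop := out = get_workflow_phase_alt labels
instance (labels : List String) (out : Option String) : Decidable (Spec_get_workflow_phase labels out) := by unfold Spec_get_workflow_phase; infer_instance

-- ===== CLAIM (what is proved, stated in full; the proofs are below) =====
def Claim_equal_get_workflow_phase : Prop := ∀ (labels : List String), Dom_get_workflow_phase labels → Spec_get_workflow_phase labels (get_workflow_phase labels)

-- ===== LEMMAS AND PROOFS =====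

-- the items of pvPhaseByLabel as a plain association list
def pvItems : List (String × Int × String) :=
  [("forge:prd-drafting", (0, "prd_generation")),
   ("forge:prd-pending", (1, "prd_approval")),
   ("forge:prd-approved", (2, "spec_generation")),
   ("forge:spec-drafting", (3, "spec_generation")),
   ("forge:spec-pending", (4, "spec_approval")),
   ("forge:spec-approved", (5, "epic_decomposition")),
   ("forge:plan-drafting", (6, "epic_decomposition")),
   ("forge:plan-pending", (7, "plan_approval")),
   ("forge:plan-approved", (8, "task_generation")),
   ("forge:task-generated", (9, "task_routing")),
   ("forge:implementing", (10, "implementation")),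
   ("forge:pr-created", (11, "pr_created")),
   ("forge:ci-pending", (12, "ci_evaluation")),
   ("forge:ci-failed", (13, "ci_fix")),
   ("forge:review-pending", (14, "human_review")),
   ("forge:review-approved", (15, "complete")),
   ("forge:rca-drafting", (16, "rca_generation")),
   ("forge:rca-pending", (17, "rca_approval")),
   ("forge:rca-approved", (18, "bug_fix")),
   ("forge:blocked", (19, "blocked"))]

def pvLookup : List (String × Int × String) → String → Option (Int × String)
  | [], _ => none
  | e :: rest, lb => if e.1 == lb then some e.2 else pvLookup rest lb

def pvMerge : Option (Int × String) → Option (Int × String) → Option (Int × String)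
  | b, none => b
  | none, some e => some e
  | some b, some e => if e.1 < b.1 then some e else some b

-- first entry of D whose key occurs in ls
def pvScanD : List (String × Int × String) → List String → Option (Int × String)
  | [], _ => none
  | e :: rest, ls => if ls.contains e.1 then some e.2 else pvScanD rest ls

theorem pvGetMk (L : List (String × Int × String)) (lb : String) :
    (PySem.Dict.mk L).get? lb = pvLookup L lb := by
  induction L with
  | nil => simp [PySem.Dict.get?, pvLookup]
  | cons e L ih =>
    obtain ⟨k, v⟩ := e
    rw [PySem.Dict.get?_mk_cons]
    simp only [pvLookup]
    by_cases h : k = lb <;> simp [h, ih]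

theorem pvGet_eq (lb : String) : pvPhaseByLabel.get? lb = pvLookup pvItems lb := by
  have h : pvPhaseByLabel = PySem.Dict.mk pvItems := by decide
  rw [h, pvGetMk]

theorem pvMerge_none (b : Option (Int × String)) : pvMerge b none = b := by cases b <;> rfl

theorem pvMerge_none_left (b : Option (Int × String)) : pvMerge none b = b := by
  cases b <;> rfl

theorem pvMerge_assoc (a b c : Option (Int × String)) :
    pvMerge (pvMerge a b) c = pvMerge a (pvMerge b c) := by
  rcases a with _ | a <;> rcases b with _ | b <;> rcases c with _ | c <;>
    simp only [pvMerge, pvMerge_none, pvMerge_none_left] <;>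
    split_ifs <;> first | rfl | omega | (simp only [pvMerge]; split_ifs <;> first | rfl | omega)

theorem pvStep_eq (b : Option (Int × String)) (lb : String) :
    pvStep b lb = pvMerge b (pvPhaseByLabel.get? lb) := by
  cases h : pvPhaseByLabel.get? lb <;> cases b <;> simp [pvStep, pvMerge, h]

theorem pvFoldl_merge (ls : List String) (b0 : Option (Int × String)) :
    ls.foldl pvStep b0 = pvMerge b0 (ls.foldl pvStep none) := by
  induction ls generalizing b0 with
  | nil => simp [List.foldl, pvMerge_none]
  | cons l ls ih =>
    simp only [List.foldl]
    rw [ih (pvStep b0 l), ih (pvStep none l), pvStep_eq b0 l, pvStep_eq none l,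
      pvMerge_none_left, pvMerge_assoc]

theorem pvScanD_mem {D : List (String × Int × String)} {ls : List String}
    {v : Int × String} (h : pvScanD D ls = some v) : ∃ e ∈ D, e.2 = v := by
  induction D with
  | nil => simp [pvScanD] at h
  | cons e D ih =>
    simp only [pvScanD] at h
    split at h
    · exact ⟨e, by simp, by injection h⟩
    · obtain ⟨f, hf, hv⟩ := ih h
      exact ⟨f, by simp [hf], hv⟩

theorem pvLookup_mem {D : List (String × Int × String)} {lb : String}
    {v : Int × String} (h : pvLookup D lb = some v) : ∃ e ∈ D, e.2 = v := by
  induction D with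
  | nil => simp [pvLookup] at h
  | cons e D ih =>
    simp only [pvLookup] at h
    split at h
    · exact ⟨e, by simp, by injection h⟩
    · obtain ⟨f, hf, hv⟩ := ih h
      exact ⟨f, by simp [hf], hv⟩

theorem pvMerge_lookup_scan (D : List (String × Int × String))
    (hD : D.Pairwise (fun a b => a.2.1 < b.2.1)) (l : String) (ls : List String) :
    pvMerge (pvLookup D l) (pvScanD D ls) = pvScanD D (l :: ls) := by
  induction D with
  | nil => rfl
  | cons e D ih =>
    rw [List.pairwise_cons] at hD
    obtain ⟨he, hD'⟩ := hD
    obtain ⟨k, r, p⟩ := e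
    by_cases hel : k = l
    · subst hel
      simp only [pvLookup, pvScanD, beq_self_eq_true, if_true, List.contains_cons,
        BEq.rfl, Bool.true_or]
      by_cases hls : ls.contains k = true
      · simp only [hls, if_true]
        simp [pvMerge]
      · simp only [Bool.not_eq_true] at hls
        simp only [hls, Bool.false_eq_true, if_false]
        cases hsc : pvScanD D ls with
        | none => rfl
        | some v =>
          obtain ⟨f, hf, hv⟩ := pvScanD_mem hsc
          have hr : r < v.1 := by rw [← hv]; exact he f hf
          simp only [pvMerge]
          rw [if_neg (by omega)]
    · have hbeq : (k == l) = false := by simp [hel]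
      have hmem : ((l :: ls).contains k) = (ls.contains k) := by
        simp [List.contains_cons, Ne.symm hel, hel]
      simp only [pvLookup, pvScanD, hbeq, Bool.false_eq_true, if_false, hmem]
      by_cases hls : ls.contains k = true
      · simp only [hls, if_true]
        cases hlk : pvLookup D l with
        | none => rfl
        | some v =>
          obtain ⟨f, hf, hv⟩ := pvLookup_mem hlk
          have hr : r < v.1 := by rw [← hv]; exact he f hf
          simp only [pvMerge]
          rw [if_pos (by omega)]
      · simp only [Bool.not_eq_true] at hls
        simp only [hls, Bool.false_eq_true, if_false]
        exact ih hD'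

theorem pvItems_sorted : pvItems.Pairwise (fun a b => a.2.1 < b.2.1) := by decide

theorem pvFold_eq_scan (ls : List String) :
    ls.foldl pvStep none = pvScanD pvItems ls := by
  induction ls with
  | nil => rfl
  | cons l ls ih =>
    simp only [List.foldl]
    rw [pvFoldl_merge, ih, pvStep_eq, pvGet_eq]
    have h0 : pvMerge none (pvLookup pvItems l) = pvLookup pvItems l := by
      cases pvLookup pvItems l <;> rfl
    rw [h0, pvMerge_lookup_scan pvItems pvItems_sorted]

theorem pvContains_filter (f : String → Bool) (x : String) (hx : f x = true)
    (ls : List String) : (ls.filter f).contains x = ls.contains x := by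
  by_cases h : x ∈ ls
  · have h2 : x ∈ ls.filter f := List.mem_filter.mpr ⟨h, hx⟩
    simp [h, h2]
  · have h2 : x ∉ ls.filter f := fun hc => h (List.mem_filter.mp hc).1
    simp [h, h2]

theorem pvScanA_eq_scanD (labels : List String)
    (P : List (String × String)) (D : List (String × Int × String))
    (h : D.map (fun e => (e.1, e.2.2)) = P)
    (hf : ∀ e ∈ P, PySem.Str.startswith e.1 "forge:" = true) :
    pvScanA P (labels.filter (fun lb => PySem.Str.startswith lb "forge:")) =
      (match pvScanD D labels with | none => "unknown" | some b => b.2) := by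
  induction D generalizing P with
  | nil => subst h; rfl
  | cons e D ih =>
    subst h
    have hfe : PySem.Str.startswith e.1 "forge:" = true := hf (e.1, e.2.2) (by simp)
    simp only [List.map_cons, pvScanA, pvScanD]
    rw [pvContains_filter (fun lb => PySem.Str.startswith lb "forge:") e.1 hfe]
    split
    · rfl
    · exact ih (D.map (fun e => (e.1, e.2.2))) rfl
        (fun x hx => hf x (by simp [List.mem_cons, hx]))

theorem pvPriority_map : pvItems.map (fun e => (e.1, e.2.2)) = pvPriority := by decide

theorem pvPriority_forge :
    ∀ e ∈ pvPriority, PySem.Str.startswith e.1 "forge:" = true := by decide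

-- ===== VERDICT (by name: the statement is the Claim_ definition above) =====
theorem get_workflow_phase_spec : Claim_equal_get_workflow_phase := by
  intro labels _
  unfold Spec_get_workflow_phase get_workflow_phase get_workflow_phase_alt
  by_cases h1 : labels.filter (fun lb => PySem.Str.startswith lb "forge:") = []
  · have h2 : labels.any (fun lb => PySem.Str.startswith lb "forge:") = false := by
      rw [List.any_eq_false]
      intro x hx hc
      have : x ∈ labels.filter (fun lb => PySem.Str.startswith lb "forge:") :=
        List.mem_filter.mpr ⟨hx, hc⟩
      rw [h1] at this
      exact (List.not_mem_nil this).elim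
    rw [if_pos h1, if_pos (show (!(labels.any fun lb => PySem.Str.startswith lb "forge:")) = true by rw [h2]; rfl)]
  · have h2 : (labels.any fun lb => PySem.Str.startswith lb "forge:") = true := by
      rw [List.any_eq_true]
      obtain ⟨x, hx⟩ := List.exists_mem_of_ne_nil _ h1
      have := List.mem_filter.mp hx
      exact ⟨x, this.1, this.2⟩
    rw [if_neg h1, if_neg (show ¬(!(labels.any fun lb => PySem.Str.startswith lb "forge:")) = true by rw [h2]; simp)]
    by_cases h3 : labels.contains "forge:managed" = true
    · rw [if_neg (show ¬(!(labels.contains "forge:managed")) = true by rw [h3]; simp),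
        if_neg (show ¬(!(labels.contains "forge:managed")) = true by rw [h3]; simp)]
      rw [pvFold_eq_scan,
        pvScanA_eq_scanD labels pvPriority pvItems pvPriority_map pvPriority_forge]
      cases pvScanD pvItems labels <;> rfl
    · simp only [Bool.not_eq_true] at h3
      rw [if_pos (show (!(labels.contains "forge:managed")) = true by rw [h3]; rfl),
        if_pos (show (!(labels.contains "forge:managed")) = true by rw [h3]; rfl)]
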